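-- pv_equiv track=rewrite | github.com/murodbecks/ENG1010_algorithms-data-structures | assignment1_ai/live.py | _get_neighbor_cells
-- ===== SOURCE A (Python) =====
-- from typing import List, Dict, Set, Tuple, Optional
--
-- def _get_neighbor_cells(cell: Tuple[int, ...]) -> List[Tuple[int, ...]]:
--     """Get all neighboring cells (including self) - 27 cells in 3D, 9 in 2D."""
--     neighbors = []
--     ranges = [range(c - 1, c + 2) for c in cell]
--
--     def generate_combos(idx, current):
--         if idx == len(ranges):
--             neighbors.append(tuple(current))
--             return
--         for val in ranges[idx]:
--             generate_combos(idx + 1, current + [val])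
--
--     generate_combos(0, [])
--     return neighbors
-- ===== SOURCE B (Python) =====
-- from typing import List, Tuple
--
-- def _get_neighbor_cells(cell: Tuple[int, ...]) -> List[Tuple[int, ...]]:
--     """Get all neighboring cells (including self) - 27 cells in 3D, 9 in 2D."""
--     result = [()]
--     for c in cell:
--         rng = range(c - 1, c + 2)
--         result = [p + (v,) for p in result for v in rng]
--     return result
-- ===== Notes on version B (the rewrite author's own statement) =====
-- stated objective: simpler
-- what changed: Replaced the nested closure recursion that appends into a captured accumulator with an iterative Cartesian-product fold that extends every prefix by each value of the current dimension's range.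
import Mathlib
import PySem

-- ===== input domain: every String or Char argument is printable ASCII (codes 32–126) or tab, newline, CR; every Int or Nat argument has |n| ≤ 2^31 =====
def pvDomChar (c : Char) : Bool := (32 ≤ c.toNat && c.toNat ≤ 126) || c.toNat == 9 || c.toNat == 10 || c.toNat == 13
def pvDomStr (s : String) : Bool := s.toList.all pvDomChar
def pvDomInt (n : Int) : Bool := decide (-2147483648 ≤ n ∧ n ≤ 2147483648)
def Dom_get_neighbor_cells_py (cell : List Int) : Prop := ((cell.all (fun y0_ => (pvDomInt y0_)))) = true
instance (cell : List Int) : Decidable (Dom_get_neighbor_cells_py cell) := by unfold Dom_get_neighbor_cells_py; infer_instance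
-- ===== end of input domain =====

-- B replaces A's accumulating closure recursion by an iterative Cartesian-product fold (simpler decomposition; same cost).

-- ===== PORT A =====
-- generate_combos(idx, current): structural recursion over the remaining ranges,
-- threading the 'neighbors' accumulator exactly as the Python closure does.
def pvGenCombos (ranges : List (List Int)) (current : List Int)
    (neighbors : List (List Int)) : List (List Int) :=
  match ranges with
  | [] => neighbors ++ [current]
  | r :: rs => r.foldl (fun acc val => pvGenCombos rs (current ++ [val]) acc) neighbors

def get_neighbor_cells_py (cell : List Int) : List (List Int) :=
  let ranges := cell.map (fun c => PySem.List.pyRange (c - 1) (c + 2) 1)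
  pvGenCombos ranges [] []

-- ===== PORT B =====
def get_neighbor_cells_py_alt (cell : List Int) : List (List Int) :=
  cell.foldl
    (fun result c =>
      let rng := PySem.List.pyRange (c - 1) (c + 2) 1
      result.flatMap (fun p => rng.map (fun v => p ++ [v])))
    [[]]

-- ===== PRECONDITION & SPEC =====
def Spec_get_neighbor_cells_py (cell : List Int) (out : List (List Int)) : Prop := out = get_neighbor_cells_py_alt cell
instance (cell : List Int) (out : List (List Int)) : Decidable (Spec_get_neighbor_cells_py cell out) := by unfold Spec_get_neighbor_cells_py; infer_instance

-- ===== CLAIM (what is proved, stated in full; the proofs are below) =====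
def Claim_equal_get_neighbor_cells_py : Prop := ∀ (cell : List Int), Dom_get_neighbor_cells_py cell → Spec_get_neighbor_cells_py cell (get_neighbor_cells_py cell)

-- ===== LEMMAS AND PROOFS =====

-- the abstract Cartesian product of a list of ranges, head dimension slowest
def pvProd (ranges : List (List Int)) : List (List Int) :=
  match ranges with
  | [] => [[]]
  | r :: rs => r.flatMap (fun v => (pvProd rs).map (fun p => v :: p))

theorem pvGenCombos_eq (ranges : List (List Int)) :
    ∀ (current : List Int) (neighbors : List (List Int)),
      pvGenCombos ranges current neighbors
        = neighbors ++ (pvProd ranges).map (fun p => current ++ p) := by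
  induction ranges with
  | nil => intro current neighbors; simp [pvGenCombos, pvProd]
  | cons r rs ih =>
    intro current neighbors
    show r.foldl (fun acc val => pvGenCombos rs (current ++ [val]) acc) neighbors = _
    have h : ∀ (l : List Int) (acc : List (List Int)),
        l.foldl (fun acc val => pvGenCombos rs (current ++ [val]) acc) acc
          = acc ++ l.flatMap (fun v => (pvProd rs).map (fun p => (current ++ [v]) ++ p)) := by
      intro l
      induction l with
      | nil => intro acc; simp
      | cons v vs ihv =>
        intro acc
        simp only [List.foldl_cons, List.flatMap_cons]
        rw [ihv, ih]
        simp [List.append_assoc]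
    rw [h]
    simp only [pvProd, List.map_flatMap, List.map_map]
    congr 1
    apply List.flatMap_congr
    intro v _
    simp [Function.comp_def, List.append_assoc]

theorem pvFold_eq (cell : List Int) :
    ∀ (acc : List (List Int)),
      cell.foldl
        (fun result c =>
          let rng := PySem.List.pyRange (c - 1) (c + 2) 1
          result.flatMap (fun p => rng.map (fun v => p ++ [v])))
        acc
      = acc.flatMap (fun q =>
          (pvProd (cell.map (fun c => PySem.List.pyRange (c - 1) (c + 2) 1))).map
            (fun p => q ++ p)) := by
  induction cell with
  | nil => intro acc; simp [pvProd]
  | cons c cs ih =>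
    intro acc
    simp only [List.foldl_cons]
    rw [ih]
    simp only [List.map_cons, pvProd, List.flatMap_assoc, List.map_flatMap,
      List.flatMap_map, List.map_map]
    apply List.flatMap_congr
    intro q _
    simp [Function.comp_def]

-- ===== VERDICT (by name: the statement is the Claim_ definition above) =====
theorem get_neighbor_cells_py_spec : Claim_equal_get_neighbor_cells_py := by
  intro cell _
  show get_neighbor_cells_py cell = get_neighbor_cells_py_alt cell
  unfold get_neighbor_cells_py get_neighbor_cells_py_alt
  rw [pvGenCombos_eq, pvFold_eq]
  simp
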